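-- pv_equiv track=rewrite | github.com/Reins981/speedcamwarner | CalculatorThreads.py | is_road_class_stable
-- ===== SOURCE A (Python) =====
-- def is_road_class_stable(road_candidates, road_class_value):
--     if not isinstance(road_class_value, int):
--         return False
--
--     counter = 0
--     for x, y in zip(road_candidates, road_candidates[1:]):
--         if x == y and x == road_class_value:
--             counter += 1
--     # Example:
--     # 1 1
--     # 1 1
--     return counter == 2
-- ===== SOURCE B (Python) =====
-- def is_road_class_stable(road_candidates, road_class_value):
--     if not isinstance(road_class_value, int):
--         return False
--     total = 0
--     n = len(road_candidates)
--     i = 0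
--     while i < n:
--         j = i + 1
--         while j < n and road_candidates[j] == road_candidates[i]:
--             j += 1
--         if road_candidates[i] == road_class_value:
--             total += (j - i) - 1
--         i = j
--     return total == 2
-- ===== Notes on version B (the rewrite author's own statement) =====
-- stated objective: alternative
-- what changed: B decomposes the list into maximal runs of equal elements and sums (run length - 1) over runs whose value matches, instead of scanning adjacent pairs with a counter.
import Mathlib
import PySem

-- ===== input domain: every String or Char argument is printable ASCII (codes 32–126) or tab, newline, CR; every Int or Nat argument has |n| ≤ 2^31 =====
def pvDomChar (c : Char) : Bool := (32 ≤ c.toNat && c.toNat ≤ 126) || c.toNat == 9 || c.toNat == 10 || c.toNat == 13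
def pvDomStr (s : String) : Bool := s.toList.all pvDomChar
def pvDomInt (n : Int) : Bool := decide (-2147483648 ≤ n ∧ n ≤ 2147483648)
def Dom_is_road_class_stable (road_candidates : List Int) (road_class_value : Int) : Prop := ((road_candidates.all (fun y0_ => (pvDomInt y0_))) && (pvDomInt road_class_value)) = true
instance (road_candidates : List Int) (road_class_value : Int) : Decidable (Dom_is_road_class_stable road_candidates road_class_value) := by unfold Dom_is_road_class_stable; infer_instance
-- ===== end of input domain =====

-- B is an alternative decomposition (maximal runs of equal elements, summing run length - 1)
-- of A's adjacent-pair counter; same O(n) cost, proved equal on all inputs.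

-- ===== PORT A =====
-- the isinstance(road_class_value, int) guard always passes: road_class_value : Int here
def is_road_class_stable (road_candidates : List Int) (road_class_value : Int) : Bool :=
  let counter :=
    (road_candidates.zip (road_candidates.drop 1)).foldl
      (fun c p => if p.1 = p.2 ∧ p.1 = road_class_value then c + 1 else c) (0 : Int)
  decide (counter = 2)

-- ===== PORT B =====
-- inner while loop of Source B: consume the leading run equal to v, return (run length past head, rest)
def pvSpanEq (v : Int) : List Int → Nat × List Int
  | [] => (0, [])
  | x :: xs => if x = v then ((pvSpanEq v xs).1 + 1, (pvSpanEq v xs).2) else (0, x :: xs)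

theorem pvSpanEq_len (v : Int) (xs : List Int) : (pvSpanEq v xs).2.length ≤ xs.length := by
  induction xs with
  | nil => simp [pvSpanEq]
  | cons x xs ih =>
    simp only [pvSpanEq]
    split <;> simp <;> omega

-- outer while loop of Source B: total over maximal runs
def pvRunTotal (value : Int) : List Int → Nat
  | [] => 0
  | x :: xs =>
    (if x = value then (pvSpanEq x xs).1 else 0) + pvRunTotal value (pvSpanEq x xs).2
termination_by xs => xs.length
decreasing_by exact Nat.lt_succ_of_le (pvSpanEq_len _ _)

-- the isinstance(road_class_value, int) guard always passes: road_class_value : Int here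
def is_road_class_stable_alt (road_candidates : List Int) (road_class_value : Int) : Bool :=
  decide (pvRunTotal road_class_value road_candidates = 2)

-- ===== PRECONDITION & SPEC =====
def Spec_is_road_class_stable (road_candidates : List Int) (road_class_value : Int) (out : Bool) : Prop := out = is_road_class_stable_alt road_candidates road_class_value
instance (road_candidates : List Int) (road_class_value : Int) (out : Bool) : Decidable (Spec_is_road_class_stable road_candidates road_class_value out) := by unfold Spec_is_road_class_stable; infer_instance

-- ===== CLAIM (what is proved, stated in full; the proofs are below) =====
def Claim_equal_is_road_class_stable : Prop := ∀ (road_candidates : List Int) (road_class_value : Int), Dom_is_road_class_stable road_candidates road_class_value → Spec_is_road_class_stable road_candidates road_class_value (is_road_class_stable road_candidates road_class_value)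

-- ===== LEMMAS AND PROOFS =====

-- recursive restatement of A's adjacent-pair count
def pvPairCount (value : Int) : List Int → Nat
  | x :: y :: r => (if x = y ∧ x = value then 1 else 0) + pvPairCount value (y :: r)
  | _ => 0

theorem pvFoldl_pairCount (value : Int) (xs : List Int) (c : Int) :
    (xs.zip (xs.drop 1)).foldl
      (fun c p => if p.1 = p.2 ∧ p.1 = value then c + 1 else c) c
      = c + pvPairCount value xs := by
  induction xs generalizing c with
  | nil => simp [pvPairCount]
  | cons x xs ih =>
    cases xs with
    | nil => simp [pvPairCount]
    | cons y r =>
      simp only [List.drop_succ_cons, List.drop_zero, List.zip_cons_cons, List.foldl_cons]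
      have h2 : (y :: r).zip ((y :: r).drop 1) = (y :: r).zip r := rfl
      rw [← h2, ih]
      simp only [pvPairCount]
      split <;> push_cast <;> ring

theorem pvPairCount_run (value x : Int) (xs : List Int) :
    pvPairCount value (x :: xs)
      = (if x = value then (pvSpanEq x xs).1 else 0) + pvPairCount value (pvSpanEq x xs).2 := by
  induction xs with
  | nil => simp [pvPairCount, pvSpanEq]
  | cons y ys ih =>
    by_cases h : y = x <;> by_cases hv : x = value <;>
      simp_all [pvPairCount, pvSpanEq] <;> omega

theorem pvPairCount_eq_runTotal (value : Int) (xs : List Int) :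
    pvPairCount value xs = pvRunTotal value xs := by
  fun_induction pvRunTotal value xs with
  | case1 => simp [pvPairCount]
  | case2 x xs ih => rw [pvPairCount_run, ih]

-- ===== VERDICT (by name: the statement is the Claim_ definition above) =====
theorem is_road_class_stable_spec : Claim_equal_is_road_class_stable := by
  intro rc v _
  unfold Spec_is_road_class_stable is_road_class_stable is_road_class_stable_alt
  simp only [pvFoldl_pairCount, pvPairCount_eq_runTotal, zero_add, decide_eq_decide]
  omega
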